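-- pv_equiv track=rewrite | github.com/djuares/TP-TDA-ANUAL-2024 | JuegosDeHermanos/tp3/src/backtracking.py | sacar_barcos_muy_grandes
-- ===== SOURCE A (Python) =====
-- def es_posible_colocar_barco(n, m, tamaño_barco, demanda_fila, demanda_columna):
--     # Horizontal
--     for i in range(n):
--         for j in range(m - tamaño_barco + 1):
--             if all(demanda_columna[k] >= 1 for k in range(j, j + tamaño_barco)) and demanda_fila[i] >= tamaño_barco:
--                 return True
--
--     # Vertical
--     for j in range(m):
--         for i in range(n - tamaño_barco + 1):
--             if all(demanda_fila[k] >= 1 for k in range(i, i + tamaño_barco)) and demanda_columna[j] >= tamaño_barco: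
--                 return True
--
--     return False
--
-- def sacar_barcos_muy_grandes(n, m, barcos, demanda_fila, demanda_columna):
--     max_demanda = max(max(demanda_fila), max(demanda_columna))
--
--     for idx, barco in enumerate(barcos):
--         if barco > max_demanda:
--             continue
--         if es_posible_colocar_barco(n, m, barco, demanda_fila, demanda_columna):
--             return barcos[idx:]
--
--     return []
-- ===== SOURCE B (Python) =====
-- def _stats(demanda, cantidad):
--     # max demand and longest consecutive block of demands >= 1
--     # among the first `cantidad` cells (None max if there are none)
--     mayor = None
--     mejor = racha = 0
--     for i in range(cantidad):
--         v = demanda[i]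
--         if mayor is None or mayor < v:
--             mayor = v
--         racha = racha + 1 if v >= 1 else 0
--         mejor = max(mejor, racha)
--     return mayor, mejor
--
--
-- def sacar_barcos_muy_grandes(n, m, barcos, demanda_fila, demanda_columna):
--     max_demanda = max(max(demanda_fila), max(demanda_columna))
--
--     max_f, run_f = _stats(demanda_fila, n)
--     max_c, run_c = _stats(demanda_columna, m)
--
--     def cabe(t):
--         # O(1) feasibility: a ship of length t fits horizontally iff some row
--         # demand reaches t and the column demands have t consecutive cells >= 1;
--         # symmetrically for vertical.
--         horizontal = max_f is not None and max_f >= t and run_c >= t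
--         vertical = max_c is not None and max_c >= t and run_f >= t
--         return horizontal or vertical
--
--     for idx, barco in enumerate(barcos):
--         if barco <= max_demanda and cabe(barco):
--             return barcos[idx:]
--     return []
-- ===== Notes on version B (the rewrite author's own statement) =====
-- stated objective: faster
-- what changed: Replaces the per-ship O(n*m*t) nested placement scan by one O(n+m) pass computing per-axis statistics (max demand and longest consecutive run of demands >= 1), giving an O(1) feasibility test per ship; Pre_ restricts to the natural board domain (demand lists covering the grid, dimensions not of mixed sign unless ship sizes are positive or exceed every demand), outside which A can raise IndexError/ValueError or returns an accident of its empty range loops.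
-- outside the precondition, e.g. on sacar_barcos_muy_grandes(1, -1, [0], [0], [7]): A returns [], B returns [0]; on sacar_barcos_muy_grandes(2, 1, [1], [1], [1]): A returns [1], B raises IndexError
import Mathlib
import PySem

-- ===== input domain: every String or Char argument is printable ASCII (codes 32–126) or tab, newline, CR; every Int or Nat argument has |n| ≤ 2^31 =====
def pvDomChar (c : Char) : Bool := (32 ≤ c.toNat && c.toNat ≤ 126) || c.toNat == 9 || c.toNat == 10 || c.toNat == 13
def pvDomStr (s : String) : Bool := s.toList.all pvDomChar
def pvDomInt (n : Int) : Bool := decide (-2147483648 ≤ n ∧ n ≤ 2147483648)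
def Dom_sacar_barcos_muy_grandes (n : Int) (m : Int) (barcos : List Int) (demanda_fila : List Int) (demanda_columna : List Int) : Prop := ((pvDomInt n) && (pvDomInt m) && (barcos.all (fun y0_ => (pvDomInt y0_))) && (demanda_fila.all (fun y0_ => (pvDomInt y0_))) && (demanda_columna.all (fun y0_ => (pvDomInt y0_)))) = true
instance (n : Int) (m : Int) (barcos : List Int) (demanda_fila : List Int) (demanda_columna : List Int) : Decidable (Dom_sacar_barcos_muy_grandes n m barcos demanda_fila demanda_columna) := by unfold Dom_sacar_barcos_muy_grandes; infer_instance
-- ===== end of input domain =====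

-- B replaces A's per-ship nested placement scan by precomputed per-axis statistics
-- (max demand and longest run of demands >= 1), making each ship's feasibility test O(1) (objective: faster).


-- ===== PORT A =====
-- 'for x in range(lo, hi)' with an early 'return True' on p x (short-circuit, like Python)
def pvAnyR (lo hi : Int) (p : Int → Bool) : Bool :=
  if h : lo < hi then (if p lo then true else pvAnyR (lo + 1) hi p) else false
termination_by (hi - lo).toNat
decreasing_by omega

-- 'all(p k for k in range(lo, hi))' (short-circuit, like Python)
def pvAllR (lo hi : Int) (p : Int → Bool) : Bool :=
  if h : lo < hi then (if p lo then pvAllR (lo + 1) hi p else false) else true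
termination_by (hi - lo).toNat
decreasing_by omega

def es_posible_colocar_barco (n m t : Int) (demanda_fila demanda_columna : List Int) : Bool :=
  -- Horizontal
  (pvAnyR 0 n fun i =>
    pvAnyR 0 (m - t + 1) fun j =>
      (pvAllR j (j + t) fun k =>
        decide (1 ≤ PySem.List.pyGetD demanda_columna k 0)) &&
      decide (t ≤ PySem.List.pyGetD demanda_fila i 0))
  ||
  -- Vertical
  (pvAnyR 0 m fun j =>
    pvAnyR 0 (n - t + 1) fun i =>
      (pvAllR i (i + t) fun k =>
        decide (1 ≤ PySem.List.pyGetD demanda_fila k 0)) &&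
      decide (t ≤ PySem.List.pyGetD demanda_columna j 0))

-- loop over enumerate(barcos): barcos[idx:] is the current suffix
def pvAuxA (n m maxd : Int) (df dc : List Int) : List Int → List Int
  | [] => []
  | b :: rest =>
      if maxd < b then pvAuxA n m maxd df dc rest
      else if es_posible_colocar_barco n m b df dc then b :: rest
      else pvAuxA n m maxd df dc rest

def sacar_barcos_muy_grandes (n : Int) (m : Int) (barcos : List Int) (demanda_fila : List Int) (demanda_columna : List Int) : List Int :=
  match PySem.List.max? demanda_fila (fun y => y), PySem.List.max? demanda_columna (fun y => y) with
  | some a, some b => pvAuxA n m (max a b) demanda_fila demanda_columna barcos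
  | _, _ => []  -- max() of an empty list raises in Python; excluded by Pre_

-- ===== PORT B =====
-- _stats: one 'for i in range(cantidad)' pass returning (mayor, mejor); v = demanda[i]
-- is pyGetD (Python's IndexError for cantidad > len is excluded by Pre_)
def pvStats (demanda : List Int) (cantidad : Int) : Option Int × Int :=
  let r := (PySem.List.pyRange 0 cantidad 1).foldl
    (fun st i =>
      let v := PySem.List.pyGetD demanda i 0
      let mayor : Option Int := match st.1 with
        | none => some v
        | some b => if b < v then some v else some b
      let racha : Int := if 1 ≤ v then st.2.2 + 1 else 0
      (mayor, max st.2.1 racha, racha))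
    (none, 0, 0)
  (r.1, r.2.1)

-- cabe(t): 'max_f is not None and max_f >= t and run_c >= t' etc.
def pvCabe (maxF maxC : Option Int) (runF runC : Int) (t : Int) : Bool :=
  ((match maxF with | none => false | some b => decide (t ≤ b)) && decide (t ≤ runC)) ||
  ((match maxC with | none => false | some b => decide (t ≤ b)) && decide (t ≤ runF))

def pvAuxB (maxd : Int) (cabe : Int → Bool) : List Int → List Int
  | [] => []
  | b :: rest => if b ≤ maxd && cabe b then b :: rest else pvAuxB maxd cabe rest

def sacar_barcos_muy_grandes_alt (n : Int) (m : Int) (barcos : List Int) (demanda_fila : List Int) (demanda_columna : List Int) : List Int :=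
  match PySem.List.max? demanda_fila (fun y => y) with
  | none => []  -- max() of an empty list raises in Python; excluded by Pre_
  | some a =>
    match PySem.List.max? demanda_columna (fun y => y) with
    | none => []
    | some b =>
      let f := pvStats demanda_fila n
      let c := pvStats demanda_columna m
      pvAuxB (max a b) (pvCabe f.1 c.1 f.2 c.2) barcos

-- ===== PRECONDITION & SPEC =====
-- Pre_ restricts to the natural board domain: nonempty demand lists no shorter than the
-- grid (n ≤ len(demanda_fila), m ≤ len(demanda_columna)), and dimensions that are not of
-- mixed sign unless every ship size is positive or exceeds every demand; outside it A can
-- raise ValueError/IndexError (empty list, demands shorter than the grid) or, on the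
-- excluded mixed-sign-dimension inputs with non-positive ship sizes, returns an accident
-- of its empty 'range' loops that a natural reimplementation has no reason to match.
def Pre_sacar_barcos_muy_grandes (n : Int) (m : Int) (barcos : List Int) (demanda_fila : List Int) (demanda_columna : List Int) : Prop :=
  demanda_fila ≠ [] ∧ demanda_columna ≠ [] ∧
  n ≤ (demanda_fila.length : Int) ∧ m ≤ (demanda_columna.length : Int) ∧
  ((0 ≤ n ∧ 0 ≤ m) ∨ (n ≤ 0 ∧ m ≤ 0) ∨ (∀ b ∈ barcos, 1 ≤ b) ∨
    (∀ b ∈ barcos, (∀ x ∈ demanda_fila, x < b) ∧ (∀ y ∈ demanda_columna, y < b)))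
instance (n : Int) (m : Int) (barcos : List Int) (demanda_fila : List Int) (demanda_columna : List Int) : Decidable (Pre_sacar_barcos_muy_grandes n m barcos demanda_fila demanda_columna) := by unfold Pre_sacar_barcos_muy_grandes; infer_instance

def pvWitness_sacar_barcos_muy_grandes : Int × Int × List Int × List Int × List Int :=
  (2, 2, [3, 2], [2, 1], [1, 2])

def Spec_sacar_barcos_muy_grandes (n : Int) (m : Int) (barcos : List Int) (demanda_fila : List Int) (demanda_columna : List Int) (out : List Int) : Prop := out = sacar_barcos_muy_grandes_alt n m barcos demanda_fila demanda_columna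
instance (n : Int) (m : Int) (barcos : List Int) (demanda_fila : List Int) (demanda_columna : List Int) (out : List Int) : Decidable (Spec_sacar_barcos_muy_grandes n m barcos demanda_fila demanda_columna out) := by unfold Spec_sacar_barcos_muy_grandes; infer_instance

-- ===== CLAIM (what is proved, stated in full; the proofs are below) =====
def Claim_equal_sacar_barcos_muy_grandes : Prop := ∀ (n : Int) (m : Int) (barcos : List Int) (demanda_fila : List Int) (demanda_columna : List Int), Dom_sacar_barcos_muy_grandes n m barcos demanda_fila demanda_columna → Pre_sacar_barcos_muy_grandes n m barcos demanda_fila demanda_columna → Spec_sacar_barcos_muy_grandes n m barcos demanda_fila demanda_columna (sacar_barcos_muy_grandes n m barcos demanda_fila demanda_columna)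

-- ===== LEMMAS AND PROOFS =====

-- the run components of B's stats fold, taken alone (identical to the last two slots of pvStats' step)
def pvRun (xs : List Int) : Int × Int :=
  xs.foldl (fun bc v =>
    let c : Int := if 1 ≤ v then bc.2 + 1 else 0
    (max bc.1 c, c)) (0, 0)

-- the max component of B's stats fold, taken alone
def pvBig (b : Option Int) (v : Int) : Option Int :=
  match b with
  | none => some v
  | some b => if b < v then some v else some b

-- pvStats' step over the already-fetched value
def pvLStep (st : Option Int × Int × Int) (v : Int) : Option Int × Int × Int :=
  (pvBig st.1 v,
   max st.2.1 (if 1 ≤ v then st.2.2 + 1 else 0),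
   if 1 ≤ v then st.2.2 + 1 else 0)

-- first maximal element of a nonempty list (value of Python's max)
def pvMaxD (xs : List Int) : Int :=
  match PySem.List.max? xs (fun y => y) with
  | some x => x
  | none => 0

-- xs has a contiguous block of T entries ≥ 1
def HasRun (xs : List Int) (T : Nat) : Prop :=
  ∃ p mid s, xs = p ++ mid ++ s ∧ mid.length = T ∧ ∀ v ∈ mid, 1 ≤ v

-- xs ends in a block of T entries ≥ 1
def SufRun (xs : List Int) (T : Nat) : Prop :=
  ∃ p mid, xs = p ++ mid ∧ mid.length = T ∧ ∀ v ∈ mid, 1 ≤ v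

lemma pvRun_append (xs : List Int) (v : Int) :
    pvRun (xs ++ [v]) =
      ((max (pvRun xs).1 (if 1 ≤ v then (pvRun xs).2 + 1 else 0)),
       (if 1 ≤ v then (pvRun xs).2 + 1 else 0)) := by
  simp [pvRun, List.foldl_append]

lemma pvRun_nonneg (xs : List Int) : 0 ≤ (pvRun xs).1 ∧ 0 ≤ (pvRun xs).2 := by
  induction xs using List.reverseRecOn with
  | nil => simp [pvRun]
  | append_singleton xs v ih =>
    rw [pvRun_append]
    constructor
    · exact le_trans ih.1 (le_max_left _ _)
    · dsimp only; split <;> omega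

lemma sufRun_zero (xs : List Int) : SufRun xs 0 := ⟨xs, [], by simp⟩

lemma hasRun_zero (xs : List Int) : HasRun xs 0 := ⟨xs, [], [], by simp⟩

lemma sufRun_append_succ (xs : List Int) (v : Int) (s : Nat) :
    SufRun (xs ++ [v]) (s + 1) ↔ 1 ≤ v ∧ SufRun xs s := by
  constructor
  · rintro ⟨p, mid, h, hlen, hall⟩
    rcases List.eq_nil_or_concat mid with rfl | ⟨mid', w, rfl⟩
    · simp at hlen
    · rw [List.concat_eq_append] at h hlen hall
      have h' : (p ++ mid') ++ [w] = xs ++ [v] := by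
        simpa [List.append_assoc] using h.symm
      obtain ⟨h1, h2⟩ := List.append_inj' h' rfl
      have hw : w = v := by simpa using h2
      refine ⟨hw ▸ hall w (by simp), p, mid', h1.symm, by simpa using hlen, ?_⟩
      intro x hx; exact hall x (by simp [hx])
  · rintro ⟨hv, p, mid, rfl, hlen, hall⟩
    refine ⟨p, mid ++ [v], by simp, by simp [hlen], ?_⟩
    intro x hx
    rcases List.mem_append.mp hx with h | h
    · exact hall x h
    · simpa using (List.mem_singleton.mp h) ▸ hv

lemma hasRun_append (xs : List Int) (v : Int) (T : Nat) :
    HasRun (xs ++ [v]) T ↔ HasRun xs T ∨ SufRun (xs ++ [v]) T := by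
  constructor
  · rintro ⟨p, mid, s, h, hlen, hall⟩
    rcases List.eq_nil_or_concat s with rfl | ⟨s', w, rfl⟩
    · exact Or.inr ⟨p, mid, by simpa using h, hlen, hall⟩
    · have h' : (p ++ mid ++ s') ++ [w] = xs ++ [v] := by
        simpa [List.append_assoc] using h.symm
      obtain ⟨h1, _⟩ := List.append_inj' h' rfl
      exact Or.inl ⟨p, mid, s', h1.symm, hlen, hall⟩
  · rintro (⟨p, mid, s, rfl, hlen, hall⟩ | ⟨p, mid, h, hlen, hall⟩)
    · exact ⟨p, mid, s ++ [v], by simp, hlen, hall⟩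
    · exact ⟨p, mid, [], by simp [h], hlen, hall⟩

lemma run_char (xs : List Int) : ∀ T : Nat,
    (((T : Int) ≤ (pvRun xs).2 ↔ SufRun xs T) ∧
     ((T : Int) ≤ (pvRun xs).1 ↔ HasRun xs T)) := by
  induction xs using List.reverseRecOn with
  | nil =>
    intro T
    constructor
    · simp only [pvRun, List.foldl_nil]
      constructor
      · intro h
        have : T = 0 := by omega
        subst this; exact sufRun_zero []
      · rintro ⟨p, mid, h, hlen, -⟩
        have : mid = [] := (List.append_eq_nil_iff.mp h.symm).2
        subst this; simp at hlen; omega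
    · simp only [pvRun, List.foldl_nil]
      constructor
      · intro h
        have : T = 0 := by omega
        subst this; exact hasRun_zero []
      · rintro ⟨p, mid, s, h, hlen, -⟩
        have h2 : p ++ mid ++ s = [] := h.symm
        have : mid = [] := by
          rcases List.append_eq_nil_iff.mp h2 with ⟨h3, -⟩
          exact (List.append_eq_nil_iff.mp h3).2
        subst this; simp at hlen; omega
  | append_singleton xs v ih =>
    intro T
    have hcur : ((T : Int) ≤ (pvRun (xs ++ [v])).2 ↔ SufRun (xs ++ [v]) T) := by
      rw [pvRun_append]
      dsimp only
      by_cases hv : 1 ≤ v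
      · rw [if_pos hv]
        cases T with
        | zero =>
          have := (pvRun_nonneg xs).2
          simp only [Nat.cast_zero]
          constructor
          · intro _; exact sufRun_zero _
          · intro _; omega
        | succ s =>
          rw [sufRun_append_succ]
          have hs := (ih s).1
          constructor
          · intro h; exact ⟨hv, hs.mp (by push_cast at h ⊢; omega)⟩
          · rintro ⟨-, hsr⟩
            have := hs.mpr hsr
            push_cast; omega
      · rw [if_neg hv]
        cases T with
        | zero =>
          simp only [Nat.cast_zero]
          constructor
          · intro _; exact sufRun_zero _
          · intro _; omega
        | succ s =>
          constructor
          · intro h; push_cast at h; omega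
          · rintro h
            exact absurd ((sufRun_append_succ xs v s).mp h).1 hv
    refine ⟨hcur, ?_⟩
    rw [pvRun_append]
    simp only
    rw [le_max_iff, (ih T).2, hasRun_append]
    constructor
    · rintro (h | h)
      · exact Or.inl h
      · exact Or.inr (hcur.mp (by rw [pvRun_append]; simpa using h))
    · rintro (h | h)
      · exact Or.inl h
      · right
        have := hcur.mpr h
        rw [pvRun_append] at this
        simpa using this

-- Nat-indexed window existence
def WinNat (cols : List Int) (T : Nat) : Prop :=
  ∃ J : Nat, J + T ≤ cols.length ∧ ∀ i : Nat, i < T → 1 ≤ cols.getD (J + i) 0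

lemma winNat_iff_hasRun (cols : List Int) (T : Nat) : WinNat cols T ↔ HasRun cols T := by
  constructor
  · rintro ⟨J, hle, hall⟩
    refine ⟨cols.take J, (cols.drop J).take T, cols.drop (J + T), ?_, ?_, ?_⟩
    · have h2 : cols.drop (J + T) = (cols.drop J).drop T := by rw [List.drop_drop]
      rw [List.append_assoc, h2, List.take_append_drop, List.take_append_drop]
    · simp only [List.length_take, List.length_drop]
      omega
    · intro v hv
      obtain ⟨i, hi, hEq⟩ := List.mem_iff_getElem.mp hv
      have hiT : i < T := by
        have h3 := hi
        simp only [List.length_take, List.length_drop] at h3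
        omega
      have hJi : J + i < cols.length := by omega
      have h1 := hall i hiT
      rw [List.getD_eq_getElem _ _ hJi] at h1
      have : ((cols.drop J).take T)[i] = cols[J + i] := by
        rw [List.getElem_take, List.getElem_drop]
      rw [← hEq, this]
      exact h1
  · rintro ⟨p, mid, s, rfl, hlen, hall⟩
    refine ⟨p.length, by simp [hlen], ?_⟩
    intro i hi
    have hmi : (p ++ mid ++ s).getD (p.length + i) 0 = mid.getD i 0 := by
      rw [List.append_assoc, List.getD_append_right _ _ _ _ (by omega),
        Nat.add_sub_cancel_left, List.getD_append _ _ _ _ (by omega)]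
    rw [hmi, List.getD_eq_getElem _ _ (by omega)]
    exact hall _ (List.getElem_mem _)

lemma intwin_iff_winNat (dc : List Int) (m t : Int) (ht : 1 ≤ t)
    (hm : m ≤ (dc.length : Int)) :
    ((∃ j : Int, 0 ≤ j ∧ j < m - t + 1 ∧
        ∀ k : Int, j ≤ k → k < j + t → 1 ≤ PySem.List.pyGetD dc k 0) ↔
      WinNat (dc.take m.toNat) t.toNat) := by
  constructor
  · rintro ⟨j, hj0, hjlt, hall⟩
    refine ⟨j.toNat, by simp only [List.length_take]; omega, ?_⟩
    intro i hi
    have hk := hall ((j : Int) + (i : Int)) (by omega) (by omega)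
    have hcast : (j : Int) + (i : Int) = ((j.toNat + i : Nat) : Int) := by omega
    rw [hcast, PySem.List.pyGetD_natCast] at hk
    have hlt : j.toNat + i < (dc.take m.toNat).length := by
      simp only [List.length_take]; omega
    have h4 : (dc.take m.toNat).getD (j.toNat + i) 0 = dc.getD (j.toNat + i) 0 := by
      rw [List.getD_eq_getElem _ _ hlt, List.getElem_take,
        List.getD_eq_getElem _ _ (by simp only [List.length_take] at hlt; omega)]
    rw [h4]
    exact hk
  · rintro ⟨J, hle, hall⟩
    have hlen : (dc.take m.toNat).length = min m.toNat dc.length := by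
      simp [List.length_take]
    refine ⟨(J : Int), by omega, by omega, ?_⟩
    intro k hk1 hk2
    have hkn : k.toNat < (dc.take m.toNat).length := by omega
    have h1 := hall (k.toNat - J) (by omega)
    rw [show J + (k.toNat - J) = k.toNat from by omega] at h1
    rw [List.getD_eq_getElem _ _ hkn, List.getElem_take] at h1
    rw [PySem.List.pyGetD_eq_getElem dc 0 (by omega) (by omega)]
    exact h1

lemma pvMaxD_spec (xs : List Int) (h : xs ≠ []) :
    pvMaxD xs ∈ xs ∧ ∀ y ∈ xs, y ≤ pvMaxD xs := by
  unfold pvMaxD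
  cases hM : PySem.List.max? xs (fun y => y) with
  | none => exact absurd ((PySem.List.max?_eq_none_iff xs (fun y => y)).mp hM) h
  | some M => exact ⟨PySem.List.max?_mem hM, PySem.List.max?_isMax hM⟩

lemma exists_row_iff (df : List Int) (n t : Int)
    (hn : n ≤ (df.length : Int)) (hdf : df ≠ []) :
    ((∃ i : Int, 0 ≤ i ∧ i < n ∧ t ≤ PySem.List.pyGetD df i 0) ↔
      (df.take n.toNat ≠ [] ∧ t ≤ pvMaxD (df.take n.toNat))) := by
  constructor
  · rintro ⟨i, h0, hin, hle⟩
    have hlen : (df.take n.toNat).length = min n.toNat df.length := by simp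
    have hne : df.take n.toNat ≠ [] := by
      intro h
      rw [← List.length_eq_zero_iff] at h
      have : df.length ≠ 0 := by
        intro h2; exact hdf (List.length_eq_zero_iff.mp h2)
      omega
    refine ⟨hne, ?_⟩
    have hmem : df[i.toNat]'(by omega) ∈ df.take n.toNat := by
      have hi1 : i.toNat < (df.take n.toNat).length := by omega
      have : (df.take n.toNat)[i.toNat] = df[i.toNat]'(by omega) := List.getElem_take ..
      exact this ▸ List.getElem_mem hi1
    have := (pvMaxD_spec _ hne).2 _ hmem
    rw [PySem.List.pyGetD_eq_getElem df 0 h0 (by omega)] at hle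
    omega
  · rintro ⟨hne, hmax⟩
    obtain ⟨i, hi, hEq⟩ := List.mem_iff_getElem.mp (pvMaxD_spec _ hne).1
    have hlen : (df.take n.toNat).length = min n.toNat df.length := by simp
    refine ⟨(i : Int), by omega, by omega, ?_⟩
    rw [PySem.List.pyGetD_natCast, List.getD_eq_getElem _ _ (by omega)]
    have h3 : df[i]'(by omega) = pvMaxD (df.take n.toNat) := by
      rw [← hEq]
      exact List.getElem_take.symm
    rw [h3]
    exact hmax

lemma pvAnyR_iff_aux (p : Int → Bool) (hi : Int) : ∀ (fuel : Nat) (lo : Int), (hi - lo).toNat ≤ fuel →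
    (pvAnyR lo hi p = true ↔ ∃ x : Int, lo ≤ x ∧ x < hi ∧ p x = true) := by
  intro fuel
  induction fuel with
  | zero =>
    intro lo hf
    rw [pvAnyR, dif_neg (by omega)]
    simp only [Bool.false_eq_true, false_iff]
    rintro ⟨x, h1, h2, -⟩
    omega
  | succ f ih =>
    intro lo hf
    by_cases h : lo < hi
    · rw [pvAnyR, dif_pos h]
      by_cases hp : p lo = true
      · rw [if_pos hp]
        exact iff_of_true rfl ⟨lo, le_refl lo, h, hp⟩
      · rw [if_neg hp, ih (lo + 1) (by omega)]
        constructor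
        · rintro ⟨x, h1, h2, h3⟩; exact ⟨x, by omega, h2, h3⟩
        · rintro ⟨x, h1, h2, h3⟩
          refine ⟨x, ?_, h2, h3⟩
          rcases eq_or_lt_of_le h1 with rfl | h4
          · exact absurd h3 hp
          · omega
    · rw [pvAnyR, dif_neg h]
      simp only [Bool.false_eq_true, false_iff]
      rintro ⟨x, h1, h2, -⟩
      omega

lemma pvAnyR_iff (p : Int → Bool) (lo hi : Int) :
    (pvAnyR lo hi p = true ↔ ∃ x : Int, lo ≤ x ∧ x < hi ∧ p x = true) :=
  pvAnyR_iff_aux p hi (hi - lo).toNat lo (le_refl _)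

lemma pvAllR_iff_aux (p : Int → Bool) (hi : Int) : ∀ (fuel : Nat) (lo : Int), (hi - lo).toNat ≤ fuel →
    (pvAllR lo hi p = true ↔ ∀ x : Int, lo ≤ x → x < hi → p x = true) := by
  intro fuel
  induction fuel with
  | zero =>
    intro lo hf
    rw [pvAllR, dif_neg (by omega)]
    simp only [true_iff]
    intro x h1 h2
    omega
  | succ f ih =>
    intro lo hf
    by_cases h : lo < hi
    · rw [pvAllR, dif_pos h]
      by_cases hp : p lo = true
      · rw [if_pos hp, ih (lo + 1) (by omega)]
        constructor
        · intro hall x h1 h2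
          rcases eq_or_lt_of_le h1 with rfl | h3
          · exact hp
          · exact hall x (by omega) h2
        · intro hall x h1 h2
          exact hall x (by omega) h2
      · rw [if_neg hp]
        constructor
        · intro h2; exact absurd h2 (by simp)
        · intro hall; exact absurd (hall lo (le_refl lo) h) hp
    · rw [pvAllR, dif_neg h]
      simp only [true_iff]
      intro x h1 h2
      omega

lemma pvAllR_iff (p : Int → Bool) (lo hi : Int) :
    (pvAllR lo hi p = true ↔ ∀ x : Int, lo ≤ x → x < hi → p x = true) :=
  pvAllR_iff_aux p hi (hi - lo).toNat lo (le_refl _)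

lemma bool_of_not_true {b : Bool} (h : ¬ b = true) : b = false := by
  cases b
  · rfl
  · exact absurd rfl h

lemma pvAnyR_of_le (lo hi : Int) (p : Int → Bool) (h : hi ≤ lo) : pvAnyR lo hi p = false := by
  rw [pvAnyR, dif_neg (by omega)]

lemma pvAnyR_const_false (lo hi : Int) : pvAnyR lo hi (fun _ => false) = false := by
  apply bool_of_not_true
  intro h
  obtain ⟨x, -, -, hx⟩ := (pvAnyR_iff _ lo hi).mp h
  exact absurd hx (by simp)

-- ----- pvStats decomposition -----

lemma map_getD_range_take (xs : List Int) (c : Int) (hc : c ≤ (xs.length : Int)) :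
    (PySem.List.pyRange 0 c 1).map (fun i => PySem.List.pyGetD xs i 0) = xs.take c.toNat := by
  by_cases h : c ≤ 0
  · rw [PySem.List.pyRange_one_eq_nil h, show c.toNat = 0 by omega]
    simp
  · have h2 : 0 < c := by omega
    rw [PySem.List.pyRange_one]
    apply List.ext_getElem
    · simp
      omega
    · intro i h1 h2
      simp only [List.length_map, List.length_range] at h1
      simp only [List.getElem_map, List.getElem_range, List.getElem_take]
      have hi : i < xs.length := by omega
      rw [show (0 : Int) + (i : Int) = ((i : Nat) : Int) by omega, PySem.List.pyGetD_natCast,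
        List.getD_eq_getElem _ _ hi]

lemma pvStats_take (xs : List Int) (c : Int) (hc : c ≤ (xs.length : Int)) :
    pvStats xs c =
      (let r := (xs.take c.toNat).foldl pvLStep (none, 0, 0); (r.1, r.2.1)) := by
  have h0 : pvStats xs c =
      (let r := (PySem.List.pyRange 0 c 1).foldl
        (fun st i => pvLStep st (PySem.List.pyGetD xs i 0)) (none, 0, 0); (r.1, r.2.1)) := rfl
  rw [h0, ← map_getD_range_take xs c hc, List.foldl_map]

lemma pvStats_nonpos (xs : List Int) (c : Int) (hc : c ≤ 0) : pvStats xs c = (none, 0) := by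
  unfold pvStats
  rw [PySem.List.pyRange_one_eq_nil hc]
  rfl

lemma fold_run : ∀ (l : List Int) (st : Option Int × Int × Int),
    (l.foldl pvLStep st).2 =
      l.foldl (fun bc v =>
        let c : Int := if 1 ≤ v then bc.2 + 1 else 0
        (max bc.1 c, c)) st.2 := by
  intro l
  induction l with
  | nil => intro st; rfl
  | cons v l ih =>
    intro st
    simp only [List.foldl_cons]
    rw [ih]
    rfl

lemma fold_big : ∀ (l : List Int) (st : Option Int × Int × Int),
    (l.foldl pvLStep st).1 = l.foldl pvBig st.1 := by
  intro l
  induction l with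
  | nil => intro st; rfl
  | cons v l ih =>
    intro st
    simp only [List.foldl_cons]
    rw [ih]
    rfl

lemma pvBig_some : ∀ (l : List Int) (b : Int),
    l.foldl pvBig (some b) = some (l.foldl max b) := by
  intro l
  induction l with
  | nil => intro b; rfl
  | cons v l ih =>
    intro b
    simp only [List.foldl_cons, pvBig]
    by_cases h : b < v
    · rw [if_pos h, ih, max_eq_right (le_of_lt h)]
    · rw [if_neg h, ih, max_eq_left (by omega)]

lemma foldl_max_spec : ∀ (l : List Int) (b : Int),
    (l.foldl max b = b ∨ l.foldl max b ∈ l) ∧ b ≤ l.foldl max b ∧ ∀ y ∈ l, y ≤ l.foldl max b := by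
  intro l
  induction l with
  | nil => intro b; exact ⟨Or.inl rfl, le_refl b, by simp⟩
  | cons v l ih =>
    intro b
    obtain ⟨hmem, hle, hub⟩ := ih (max b v)
    refine ⟨?_, le_trans (le_max_left b v) hle, ?_⟩
    · rcases hmem with h | h
      · rcases max_choice b v with h2 | h2
        · exact Or.inl (by rw [List.foldl_cons, h, h2])
        · exact Or.inr (by rw [List.foldl_cons, h, h2]; simp)
      · exact Or.inr (by simp [h])
    · intro y hy
      rcases List.mem_cons.mp hy with rfl | hy2
      · exact le_trans (le_max_right b y) hle
      · exact hub y hy2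

lemma bigfold_eq_maxD (l : List Int) (h : l ≠ []) :
    l.foldl pvBig none = some (pvMaxD l) := by
  cases l with
  | nil => exact absurd rfl h
  | cons v l =>
    rw [List.foldl_cons, show pvBig none v = some v from rfl, pvBig_some]
    congr 1
    obtain ⟨hmem, hle, hub⟩ := foldl_max_spec l v
    obtain ⟨hmem2, hub2⟩ := pvMaxD_spec (v :: l) (by simp)
    apply le_antisymm
    · rcases hmem with h2 | h2
      · rw [h2]; exact hub2 v (by simp)
      · exact hub2 _ (by simp [h2])
    · rcases List.mem_cons.mp hmem2 with h2 | h2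
      · rw [h2]; exact hle
      · exact hub _ h2

lemma bridge_max (l : List Int) (t : Int) :
    ((match l.foldl pvBig none with | none => false | some b => decide (t ≤ b)) = true) ↔
      (l ≠ [] ∧ t ≤ pvMaxD l) := by
  cases hl : l with
  | nil => simp
  | cons v r =>
    rw [← hl, bigfold_eq_maxD l (by rw [hl]; simp)]
    simp [hl]

-- one direction (horizontal) of es_posible equals B's closed form; vertical is the same with roles swapped
lemma half_eq (n m t : Int) (df dc : List Int)
    (hm0 : 0 ≤ m)
    (hn : n ≤ (df.length : Int)) (hm : m ≤ (dc.length : Int)) (hdf : df ≠ []) :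
    (pvAnyR 0 n fun i =>
      pvAnyR 0 (m - t + 1) fun j =>
        (pvAllR j (j + t) fun k =>
          decide (1 ≤ PySem.List.pyGetD dc k 0)) &&
        decide (t ≤ PySem.List.pyGetD df i 0)) =
      ((match (df.take n.toNat).foldl pvBig none with | none => false | some b => decide (t ≤ b)) &&
        decide (t ≤ (pvRun (dc.take m.toNat)).1)) := by
  have hrow := exists_row_iff df n t hn hdf
  have hbool : ∀ a b : Bool, ((a = true) ↔ (b = true)) → a = b := by
    intro a b h; cases a <;> cases b <;> simp_all
  apply hbool
  rw [Bool.and_eq_true, bridge_max]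
  by_cases ht : 1 ≤ t
  · have hwin : ((∃ j : Int, 0 ≤ j ∧ j < m - t + 1 ∧
        ∀ k : Int, j ≤ k → k < j + t → 1 ≤ PySem.List.pyGetD dc k 0) ↔
          t ≤ (pvRun (dc.take m.toNat)).1) := by
      rw [intwin_iff_winNat dc m t ht hm, winNat_iff_hasRun]
      have h := (run_char (dc.take m.toNat) t.toNat).2
      rw [show ((t.toNat : Nat) : Int) = t from by omega] at h
      exact h.symm
    simp only [pvAnyR_iff, pvAllR_iff, Bool.and_eq_true, decide_eq_true_eq]
    constructor
    · rintro ⟨i, hi0, hin, j, hj0, hjlt, hall, hrowi⟩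
      exact ⟨hrow.mp ⟨i, hi0, hin, hrowi⟩, hwin.mp ⟨j, hj0, hjlt, hall⟩⟩
    · rintro ⟨hr, hc⟩
      obtain ⟨i, hi0, hin, hrowi⟩ := hrow.mpr hr
      obtain ⟨j, hj0, hjlt, hall⟩ := hwin.mpr hc
      exact ⟨i, hi0, hin, j, hj0, hjlt, hall, hrowi⟩
  · -- t ≤ 0: the window condition is vacuous, the j-range is nonempty (0 ≤ m ≤ m - t),
    -- and the run bound holds trivially since runs are nonnegative
    have hrun : (decide (t ≤ (pvRun (dc.take m.toNat)).1)) = true := by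
      have := (pvRun_nonneg (dc.take m.toNat)).1
      simp
      omega
    simp only [pvAnyR_iff, pvAllR_iff, Bool.and_eq_true, decide_eq_true_eq, hrun]
    constructor
    · rintro ⟨i, hi0, hin, j, hj0, hjlt, -, hrowi⟩
      exact ⟨hrow.mp ⟨i, hi0, hin, hrowi⟩, trivial⟩
    · rintro ⟨hr, -⟩
      obtain ⟨i, hi0, hin, hrowi⟩ := hrow.mpr hr
      refine ⟨i, hi0, hin, 0, le_refl 0, by omega, ?_, hrowi⟩
      intro k hk1 hk2
      exact absurd hk2 (by omega)

lemma es_posible_eq (n m t : Int) (df dc : List Int)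
    (hn0 : 0 ≤ n) (hm0 : 0 ≤ m)
    (hn : n ≤ (df.length : Int)) (hm : m ≤ (dc.length : Int))
    (hdf : df ≠ []) (hdc : dc ≠ []) :
    es_posible_colocar_barco n m t df dc =
      pvCabe (pvStats df n).1 (pvStats dc m).1 (pvStats df n).2 (pvStats dc m).2 t := by
  rw [pvStats_take df n hn, pvStats_take dc m hm]
  simp only
  rw [fold_big, fold_big, fold_run, fold_run]
  unfold es_posible_colocar_barco pvCabe
  rw [half_eq n m t df dc hm0 hn hm hdf, half_eq m n t dc df hn0 hm hn hdc]
  rfl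

-- both sides skip every ship
lemma auxA_skip (n m maxd : Int) (df dc : List Int) (bs : List Int)
    (h : ∀ b ∈ bs, maxd < b ∨ es_posible_colocar_barco n m b df dc = false) :
    pvAuxA n m maxd df dc bs = [] := by
  induction bs with
  | nil => rfl
  | cons b rest ih =>
    have ih2 := ih fun x hx => h x (by simp [hx])
    rcases h b (by simp) with h1 | h1
    · rw [pvAuxA, if_pos h1]
      exact ih2
    · rw [pvAuxA]
      by_cases h2 : maxd < b
      · rw [if_pos h2]; exact ih2
      · rw [if_neg h2, h1]
        simpa using ih2

lemma auxB_skip (maxd : Int) (cabe : Int → Bool) (bs : List Int)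
    (h : ∀ b ∈ bs, b ≤ maxd → cabe b = false) :
    pvAuxB maxd cabe bs = [] := by
  induction bs with
  | nil => rfl
  | cons b rest ih =>
    rw [pvAuxB, if_neg]
    · exact ih fun x hx => h x (by simp [hx])
    · simp only [Bool.and_eq_true, decide_eq_true_eq]
      rintro ⟨h1, h2⟩
      rw [h b (by simp) h1] at h2
      exact Bool.false_ne_true h2

lemma aux_eq (n m maxd : Int) (df dc : List Int)
    (hn0 : 0 ≤ n) (hm0 : 0 ≤ m)
    (hn : n ≤ (df.length : Int)) (hm : m ≤ (dc.length : Int))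
    (hdf : df ≠ []) (hdc : dc ≠ []) (bs : List Int) :
    pvAuxA n m maxd df dc bs =
      pvAuxB maxd
        (pvCabe (pvStats df n).1 (pvStats dc m).1 (pvStats df n).2 (pvStats dc m).2) bs := by
  induction bs with
  | nil => rfl
  | cons b rest ih =>
    simp only [pvAuxA, pvAuxB]
    rw [es_posible_eq n m b df dc hn0 hm0 hn hm hdf hdc]
    by_cases h1 : maxd < b
    · rw [if_pos h1]
      have : (b ≤ maxd) = False := by simp; omega
      simp only [this, decide_false, Bool.false_and, Bool.false_eq_true, if_false]
      exact ih
    · rw [if_neg h1]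
      have hb : (decide (b ≤ maxd)) = true := by simp; omega
      simp only [hb, Bool.true_and]
      cases h2 : pvCabe (pvStats df n).1 (pvStats dc m).1 (pvStats df n).2 (pvStats dc m).2 b with
      | true => simp
      | false => simpa using ih

-- A finds no placement when both dimensions are non-positive
lemma es_false_nonpos (n m t : Int) (df dc : List Int) (hn : n ≤ 0) (hm : m ≤ 0) :
    es_posible_colocar_barco n m t df dc = false := by
  unfold es_posible_colocar_barco
  rw [pvAnyR_of_le 0 n _ hn, pvAnyR_of_le 0 m _ hm]
  rfl

-- A finds no placement for a positive ship when n < 0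
lemma es_false_negn (n m t : Int) (df dc : List Int) (hn : n < 0) (ht : 1 ≤ t) :
    es_posible_colocar_barco n m t df dc = false := by
  unfold es_posible_colocar_barco
  rw [pvAnyR_of_le 0 n _ (by omega)]
  have hfun : (fun j => pvAnyR 0 (n - t + 1) (fun i =>
      (pvAllR i (i + t) fun k => decide (1 ≤ PySem.List.pyGetD df k 0)) &&
      decide (t ≤ PySem.List.pyGetD dc j 0)) ) = (fun _ : Int => false) := by
    funext j
    exact pvAnyR_of_le 0 (n - t + 1) _ (by omega)
  rw [hfun, pvAnyR_const_false]
  rfl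

-- A finds no placement for a positive ship when m < 0
lemma es_false_negm (n m t : Int) (df dc : List Int) (hm : m < 0) (ht : 1 ≤ t) :
    es_posible_colocar_barco n m t df dc = false := by
  unfold es_posible_colocar_barco
  rw [pvAnyR_of_le 0 m _ (by omega)]
  have hfun : (fun i => pvAnyR 0 (m - t + 1) (fun j =>
      (pvAllR j (j + t) fun k => decide (1 ≤ PySem.List.pyGetD dc k 0)) &&
      decide (t ≤ PySem.List.pyGetD df i 0)) ) = (fun _ : Int => false) := by
    funext i
    exact pvAnyR_of_le 0 (m - t + 1) _ (by omega)
  rw [hfun, pvAnyR_const_false]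
  rfl

-- B with no rows seen rejects every positive ship
lemma cabe_noneF (mc : Option Int) (rc t : Int) (ht : 1 ≤ t) :
    pvCabe none mc 0 rc t = false := by
  unfold pvCabe
  have h0 : (decide (t ≤ (0:Int))) = false := by simp; omega
  cases mc <;> simp [h0]

-- B with no columns seen rejects every positive ship
lemma cabe_noneC (mf : Option Int) (rf t : Int) (ht : 1 ≤ t) :
    pvCabe mf none rf 0 t = false := by
  unfold pvCabe
  have h0 : (decide (t ≤ (0:Int))) = false := by simp; omega
  cases mf <;> simp [h0]

lemma cabe_none_none (t : Int) : pvCabe none none 0 0 t = false := rfl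

-- ===== VERDICT (by name: the statement is the Claim_ definition above) =====
theorem sacar_barcos_muy_grandes_spec : Claim_equal_sacar_barcos_muy_grandes := by
  intro n m barcos df dc _hdom hpre
  obtain ⟨hdf, hdc, hn, hm, hcase⟩ := hpre
  unfold Spec_sacar_barcos_muy_grandes sacar_barcos_muy_grandes sacar_barcos_muy_grandes_alt
  cases hA : PySem.List.max? df (fun y => y) with
  | none => exact absurd ((PySem.List.max?_eq_none_iff df (fun y => y)).mp hA) hdf
  | some a =>
    cases hB : PySem.List.max? dc (fun y => y) with
    | none => exact absurd ((PySem.List.max?_eq_none_iff dc (fun y => y)).mp hB) hdc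
    | some b =>
      simp only
      rcases hcase with ⟨hn0, hm0⟩ | ⟨hn1, hm1⟩ | hpos | hskip
      · exact aux_eq n m (max a b) df dc hn0 hm0 hn hm hdf hdc barcos
      · rw [pvStats_nonpos df n hn1, pvStats_nonpos dc m hm1,
          auxA_skip _ _ _ _ _ _ (fun bb _ => Or.inr (es_false_nonpos n m bb df dc hn1 hm1)),
          auxB_skip _ _ _ (fun bb _ _ => cabe_none_none bb)]
      · by_cases hn0 : 0 ≤ n
        · by_cases hm0 : 0 ≤ m
          · exact aux_eq n m (max a b) df dc hn0 hm0 hn hm hdf hdc barcos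
          · rw [pvStats_nonpos dc m (by omega),
              auxA_skip _ _ _ _ _ _
                (fun bb hbb => Or.inr (es_false_negm n m bb df dc (by omega) (hpos bb hbb))),
              auxB_skip _ _ _ (fun bb hbb _ => cabe_noneC _ _ bb (hpos bb hbb))]
        · rw [pvStats_nonpos df n (by omega),
            auxA_skip _ _ _ _ _ _
              (fun bb hbb => Or.inr (es_false_negn n m bb df dc (by omega) (hpos bb hbb))),
            auxB_skip _ _ _ (fun bb hbb _ => cabe_noneF _ _ bb (hpos bb hbb))]
      · have hmax : ∀ bb ∈ barcos, max a b < bb := by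
          intro bb hbb
          have h1 := (hskip bb hbb).1 a (PySem.List.max?_mem hA)
          have h2 := (hskip bb hbb).2 b (PySem.List.max?_mem hB)
          omega
        rw [auxA_skip _ _ _ _ _ _ (fun bb hbb => Or.inl (hmax bb hbb)),
          auxB_skip _ _ _ (fun bb hbb h => absurd h (by have := hmax bb hbb; omega))]
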